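-- pv_equiv track=rewrite | github.com/Aziz-Rakhimov/quranic-recitation-assessment | final_phase1_validation.py | phoneme_word_index
-- ===== SOURCE A (Python) =====
-- def phoneme_word_index(pos, word_boundaries, total):
--     """Return word index for a phoneme position.
--
--     word_boundaries are END positions of words in the phoneme sequence.
--     For example, if boundaries = [3, 7, 12], then:
--       - Word 0: phonemes [0..3)
--       - Word 1: phonemes [3..7)
--       - Word 2: phonemes [7..12)
--     """
--     if not word_boundaries:
--         return 0
--
--     boundaries = sorted(word_boundaries)
--
--     # Find which word this position belongs to
--     for i, end_pos in enumerate(boundaries):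
--         if pos < end_pos:
--             return i
--
--     # Position is at or beyond last boundary - return last word index
--     return len(boundaries)
-- ===== SOURCE B (Python) =====
-- def phoneme_word_index(pos, word_boundaries, total):
--     """Word index for a phoneme position: sort, then binary-search for the
--     first boundary strictly greater than pos (bisect_right by hand)."""
--     boundaries = sorted(word_boundaries)
--     lo, hi = 0, len(boundaries)
--     while lo < hi:
--         mid = (lo + hi) // 2
--         if pos < boundaries[mid]:
--             hi = mid
--         else:
--             lo = mid + 1
--     return lo
-- ===== Notes on version B (the rewrite author's own statement) =====
-- stated objective: alternative
-- what changed: Replaces the linear enumerate-and-compare scan over the sorted boundaries (and its special empty-list branch) with a hand-written binary search (bisect_right) over the sorted list.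
import Mathlib
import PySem

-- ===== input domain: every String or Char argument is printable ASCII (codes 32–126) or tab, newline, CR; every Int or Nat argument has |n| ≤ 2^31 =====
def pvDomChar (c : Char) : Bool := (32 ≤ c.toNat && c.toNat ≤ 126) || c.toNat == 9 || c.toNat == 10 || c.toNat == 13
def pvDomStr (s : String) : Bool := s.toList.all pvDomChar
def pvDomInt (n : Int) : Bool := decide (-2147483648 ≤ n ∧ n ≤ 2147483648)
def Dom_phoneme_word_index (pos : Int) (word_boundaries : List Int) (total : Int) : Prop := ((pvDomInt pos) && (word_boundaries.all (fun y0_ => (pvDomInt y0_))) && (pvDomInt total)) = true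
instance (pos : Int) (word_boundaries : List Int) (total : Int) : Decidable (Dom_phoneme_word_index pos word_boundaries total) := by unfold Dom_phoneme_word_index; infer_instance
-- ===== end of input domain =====

-- B replaces A's linear scan over the sorted boundaries (and its empty-list branch)
-- with a hand-written binary search (bisect_right); same cost class (sort dominates).


-- ===== PORT A =====
-- the for-loop: i is the enumerate counter; when the list is exhausted, i equals
-- len(boundaries), which is exactly what 'return len(boundaries)' yields.
def pwiLoop (pos : Int) : List Int → Nat → Int
  | [], i => Int.ofNat i
  | b :: rest, i => if pos < b then Int.ofNat i else pwiLoop pos rest (i + 1)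

def phoneme_word_index (pos : Int) (word_boundaries : List Int) (total : Int) : Int :=
  if word_boundaries = [] then 0
  else
    let boundaries := PySem.List.sorted word_boundaries (fun x => x) false
    pwiLoop pos boundaries 0

-- ===== PORT B =====
-- the while-loop of Source B; 'boundaries[mid]' is exact: every call keeps mid < bs.length.
def pwiBis (bs : List Int) (pos : Int) (lo hi : Nat) : Nat :=
  if lo < hi then
    let mid := (lo + hi) / 2
    if pos < bs.getD mid 0 then pwiBis bs pos lo mid
    else pwiBis bs pos (mid + 1) hi
  else lo
termination_by hi - lo
decreasing_by all_goals omega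

def phoneme_word_index_alt (pos : Int) (word_boundaries : List Int) (total : Int) : Int :=
  let boundaries := PySem.List.sorted word_boundaries (fun x => x) false
  Int.ofNat (pwiBis boundaries pos 0 boundaries.length)

-- ===== PRECONDITION & SPEC =====
def Spec_phoneme_word_index (pos : Int) (word_boundaries : List Int) (total : Int) (out : Int) : Prop := out = phoneme_word_index_alt pos word_boundaries total
instance (pos : Int) (word_boundaries : List Int) (total : Int) (out : Int) : Decidable (Spec_phoneme_word_index pos word_boundaries total out) := by unfold Spec_phoneme_word_index; infer_instance

-- ===== CLAIM (what is proved, stated in full; the proofs are below) =====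
def Claim_equal_phoneme_word_index : Prop := ∀ (pos : Int) (word_boundaries : List Int) (total : Int), Dom_phoneme_word_index pos word_boundaries total → Spec_phoneme_word_index pos word_boundaries total (phoneme_word_index pos word_boundaries total)

-- ===== LEMMAS AND PROOFS =====

-- the first index of bs whose element is strictly greater than pos (length if none)
def scanT (pos : Int) : List Int → Nat
  | [] => 0
  | b :: rest => if pos < b then 0 else scanT pos rest + 1

theorem pwiLoop_eq_scanT (pos : Int) (bs : List Int) :
    ∀ i : Nat, pwiLoop pos bs i = Int.ofNat (i + scanT pos bs) := by
  induction bs with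
  | nil => intro i; simp [pwiLoop, scanT]
  | cons b rest ih =>
    intro i
    simp only [pwiLoop, scanT]
    split
    · simp
    · rw [ih]; congr 1; omega

theorem scanT_le_length (pos : Int) (bs : List Int) : scanT pos bs ≤ bs.length := by
  induction bs with
  | nil => simp [scanT]
  | cons b rest ih => simp only [scanT, List.length_cons]; split <;> omega

theorem scanT_lt (pos : Int) (bs : List Int) :
    ∀ j (hj : j < bs.length), j < scanT pos bs → bs[j] ≤ pos := by
  induction bs with
  | nil => simp [scanT]
  | cons b rest ih =>
    intro j hj hlt
    simp only [scanT] at hlt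
    split at hlt
    · omega
    · match j with
      | 0 => simpa using not_lt.mp (by assumption)
      | j + 1 => exact ih j (by simpa using hj) (by omega)

theorem scanT_ge (pos : Int) (bs : List Int) (hs : bs.Pairwise (· ≤ ·)) :
    ∀ j (hj : j < bs.length), scanT pos bs ≤ j → pos < bs[j] := by
  induction bs with
  | nil => simp
  | cons b rest ih =>
    intro j hj hge
    simp only [scanT] at hge
    split at hge
    · rename_i hpb
      match j with
      | 0 => exact hpb
      | j + 1 =>
        have hj' : j < rest.length := by simpa using hj
        have hb : b ≤ rest[j] := (List.pairwise_cons.mp hs).1 _ (List.getElem_mem hj')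
        simpa using lt_of_lt_of_le hpb hb
    · match j with
      | 0 => omega
      | j + 1 =>
        exact ih (List.pairwise_cons.mp hs).2 j (by simpa using hj) (by omega)

theorem pwiBis_eq (bs : List Int) (pos : Int) (T : Nat)
    (h1 : ∀ j (hj : j < bs.length), j < T → bs[j] ≤ pos)
    (h2 : ∀ j (hj : j < bs.length), T ≤ j → pos < bs[j]) :
    ∀ n lo hi, hi - lo = n → hi ≤ bs.length → lo ≤ T → T ≤ hi →
      pwiBis bs pos lo hi = T := by
  intro n
  induction n using Nat.strong_induction_on with
  | _ n ih =>
    intro lo hi hn hhi hloT hThi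
    rw [pwiBis]
    by_cases hlt : lo < hi
    · rw [if_pos hlt]
      have hmidlt : (lo + hi) / 2 < bs.length := by omega
      have hget : bs.getD ((lo + hi) / 2) 0 = bs[(lo + hi) / 2] := List.getD_eq_getElem bs 0 hmidlt
      show (if pos < bs.getD ((lo + hi) / 2) 0 then pwiBis bs pos lo ((lo + hi) / 2)
            else pwiBis bs pos ((lo + hi) / 2 + 1) hi) = T
      by_cases hc : pos < bs.getD ((lo + hi) / 2) 0
      · simp only [if_pos hc]
        rw [hget] at hc
        have hTmid : T ≤ (lo + hi) / 2 := by
          by_contra h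
          exact absurd (h1 _ hmidlt (by omega)) (not_le.mpr hc)
        exact ih ((lo + hi) / 2 - lo) (by omega) lo _ rfl (by omega) hloT hTmid
      · rw [hget] at hc
        have hmidT : (lo + hi) / 2 < T := by
          by_contra h
          exact hc (h2 _ hmidlt (by omega))
        simp only [if_neg (show ¬ pos < bs.getD ((lo + hi) / 2) 0 by rw [hget]; exact hc)]
        exact ih (hi - ((lo + hi) / 2 + 1)) (by omega) _ hi rfl hhi (by omega) hThi
    · rw [if_neg hlt]; omega

-- ===== VERDICT (by name: the statement is the Claim_ definition above) =====
theorem phoneme_word_index_spec : Claim_equal_phoneme_word_index := by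
  intro pos wb total _
  unfold Spec_phoneme_word_index phoneme_word_index phoneme_word_index_alt
  by_cases hwb : wb = []
  · subst hwb
    have hnil : PySem.List.sorted ([] : List Int) (fun x => x) false = [] := by
      simp [PySem.List.sorted]
    simp only [hnil]
    rw [pwiBis]
    simp
  · simp only [if_neg hwb]
    set bs := PySem.List.sorted wb (fun x => x) false with hbs
    have hp : bs.Pairwise (· ≤ ·) := PySem.List.sorted_pairwise wb (fun x => x)
    rw [pwiLoop_eq_scanT,
        pwiBis_eq bs pos (scanT pos bs) (scanT_lt pos bs) (scanT_ge pos bs hp)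
          bs.length 0 bs.length rfl le_rfl (Nat.zero_le _) (scanT_le_length pos bs)]
    simp
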